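-- pv_equiv track=rewrite | github.com/mchaput/whoosh | src/whoosh/kv/blueline.py | dedup_merge
-- ===== SOURCE A (Python) =====
-- def dedup_merge(keyiter, keylist):
--     i = 0
--     _listlen = len(keylist)
--     for key in keyiter:
--         k = None
--         while i < _listlen and keylist[i] <= key:
--             k = keylist[i]
--             yield k
--             i += 1
--
--         if k != key:
--             yield key
--
--     while i < _listlen:
--         yield keylist[i]
--         i += 1
-- ===== SOURCE B (Python) =====
-- def dedup_merge(keyiter, keylist):
--     # staged plan-then-emit: pass 1 computes each key's run cut point,
--     # pass 2 assembles the output from slices and the cut plan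
--     keys = list(keyiter)
--     n = len(keylist)
--     # pass 1: cut points -- where each key's run of list elements ends
--     cuts = []
--     j = 0
--     for key in keys:
--         while j < n and keylist[j] <= key:
--             j += 1
--         cuts.append(j)
--     # pass 2: assemble from the plan
--     j = 0
--     for key, c in zip(keys, cuts):
--         yield from keylist[j:c]
--         if c == j or keylist[c - 1] != key:
--             yield key
--         j = c
--     yield from keylist[j:]
-- ===== Notes on version B (the rewrite author's own statement) =====
-- stated objective: alternative
-- what changed: Replaced A's interleaved generator state machine (nested for/while with a reset k tracker and a separate tail loop) by a staged plan-then-emit algorithm: a first pass materialises the keys and computes an array of run cut points, a second pass assembles the output from list slices and decides suppression by inspecting the element before each cut.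
import Mathlib
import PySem

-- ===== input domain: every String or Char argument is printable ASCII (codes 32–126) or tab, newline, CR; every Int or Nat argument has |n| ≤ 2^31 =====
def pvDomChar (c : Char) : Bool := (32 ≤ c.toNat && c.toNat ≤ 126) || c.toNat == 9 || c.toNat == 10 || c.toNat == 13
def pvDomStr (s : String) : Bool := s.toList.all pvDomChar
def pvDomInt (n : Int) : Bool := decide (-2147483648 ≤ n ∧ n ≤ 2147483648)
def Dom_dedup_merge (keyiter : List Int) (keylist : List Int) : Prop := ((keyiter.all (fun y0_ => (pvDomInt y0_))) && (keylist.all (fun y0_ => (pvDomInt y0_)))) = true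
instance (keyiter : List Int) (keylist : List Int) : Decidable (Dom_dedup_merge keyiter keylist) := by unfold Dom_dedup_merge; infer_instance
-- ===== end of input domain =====

-- B replaces A's interleaved generator state machine by a staged plan-then-emit
-- algorithm: pass 1 computes run cut points, pass 2 assembles from slices
-- (objective: alternative decomposition, same cost).

-- ===== PORT A =====
-- inner `while i < _listlen and keylist[i] <= key` loop: emits elements, tracks k
def pvInnerA (keylist : List Int) (key : Int) (i : Nat) (k : Option Int) : List Int × Nat × Option Int :=
  if h : i < keylist.length ∧ keylist.getD i 0 ≤ key then
    let v := keylist.getD i 0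
    let r := pvInnerA keylist key (i + 1) (some v)
    (v :: r.1, r.2)
  else
    ([], i, k)
termination_by keylist.length - i
decreasing_by omega

-- trailing `while i < _listlen` loop
def pvTailA (keylist : List Int) (i : Nat) : List Int :=
  if h : i < keylist.length then keylist.getD i 0 :: pvTailA keylist (i + 1)
  else []
termination_by keylist.length - i
decreasing_by omega

-- outer `for key in keyiter` loop
def pvOuterA (keylist : List Int) : List Int → Nat → List Int
  | [], i => pvTailA keylist i
  | key :: rest, i =>
    let r := pvInnerA keylist key i none
    (r.1 ++ (if r.2.2 ≠ some key then [key] else [])) ++ pvOuterA keylist rest r.2.1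

def dedup_merge (keyiter : List Int) (keylist : List Int) : List Int :=
  pvOuterA keylist keyiter 0

-- ===== PORT B =====
-- pass 1's inner `while j < n and keylist[j] <= key: j += 1`
def pvAdvB (keylist : List Int) (key : Int) (j : Nat) : Nat :=
  if h : j < keylist.length ∧ keylist.getD j 0 ≤ key then pvAdvB keylist key (j + 1) else j
termination_by keylist.length - j
decreasing_by omega

-- pass 1: `for key in keys: … cuts.append(j)`
def pvCutsB (keylist : List Int) : List Int → Nat → List Nat
  | [], _ => []
  | key :: ks, j =>
    let c := pvAdvB keylist key j
    c :: pvCutsB keylist ks c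

-- pass 2: `for key, c in zip(keys, cuts): …` then `yield from keylist[j:]`
def pvEmitB (keylist : List Int) : List (Int × Nat) → Nat → List Int
  | [], j => PySem.List.slice keylist (some (j : Int)) none
  | (key, c) :: rest, j =>
    PySem.List.slice keylist (some (j : Int)) (some (c : Int)) ++
      (if c = j ∨ keylist.getD (c - 1) 0 ≠ key then [key] else []) ++
      pvEmitB keylist rest c

def dedup_merge_alt (keyiter : List Int) (keylist : List Int) : List Int :=
  pvEmitB keylist (keyiter.zip (pvCutsB keylist keyiter 0)) 0

-- ===== PRECONDITION & SPEC =====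
def Spec_dedup_merge (keyiter : List Int) (keylist : List Int) (out : List Int) : Prop := out = dedup_merge_alt keyiter keylist
instance (keyiter : List Int) (keylist : List Int) (out : List Int) : Decidable (Spec_dedup_merge keyiter keylist out) := by unfold Spec_dedup_merge; infer_instance

-- ===== CLAIM =====
def Claim_equal_dedup_merge : Prop := ∀ (keyiter : List Int) (keylist : List Int), Dom_dedup_merge keyiter keylist → Spec_dedup_merge keyiter keylist (dedup_merge keyiter keylist)

-- ===== LEMMAS AND PROOFS =====

theorem pvAdvB_ge (keylist : List Int) (key : Int) (j : Nat) : j ≤ pvAdvB keylist key j := by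
  fun_induction pvAdvB keylist key j with
  | case1 j h ih => omega
  | case2 j h => omega

theorem pvAdvB_le (keylist : List Int) (key : Int) (j : Nat) (hj : j ≤ keylist.length) :
    pvAdvB keylist key j ≤ keylist.length := by
  fun_induction pvAdvB keylist key j with
  | case1 j h ih => exact ih (by omega)
  | case2 j h => omega

-- A's inner loop characterised by B's cut point
theorem pvInnerA_eq (keylist : List Int) (key : Int) (j : Nat) (k0 : Option Int) :
    pvInnerA keylist key j k0 =
      ((keylist.drop j).take (pvAdvB keylist key j - j), pvAdvB keylist key j,
        if pvAdvB keylist key j = j then k0 else some (keylist.getD (pvAdvB keylist key j - 1) 0)) := by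
  fun_induction pvAdvB keylist key j generalizing k0 with
  | case1 j h ih =>
    rw [pvInnerA, dif_pos h]
    have hge := pvAdvB_ge keylist key (j + 1)
    have hc : pvAdvB keylist key j = pvAdvB keylist key (j + 1) := by
      rw [pvAdvB, dif_pos h]
    simp only [ih]
    have hd : keylist.drop j = keylist.getD j 0 :: keylist.drop (j + 1) := by
      rw [List.getD_eq_getElem _ _ h.1]
      exact (List.drop_eq_getElem_cons h.1)
    simp only [hd]
    have ht : pvAdvB keylist key (j + 1) - j = (pvAdvB keylist key (j + 1) - (j + 1)) + 1 := by omega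
    rw [ht, List.take_succ_cons]
    have hne : pvAdvB keylist key (j + 1) ≠ j := by omega
    by_cases he : pvAdvB keylist key (j + 1) = j + 1
    · simp [he]
    · simp [he, hne]
  | case2 j h =>
    rw [pvInnerA, dif_neg h]
    simp

-- A's tail loop is a drop
theorem pvTailA_eq (keylist : List Int) (j : Nat) : pvTailA keylist j = keylist.drop j := by
  fun_induction pvTailA keylist j with
  | case1 j h ih =>
    rw [ih, List.getD_eq_getElem _ _ h]
    exact (List.drop_eq_getElem_cons h).symm
  | case2 j h =>
    rw [List.drop_eq_nil_of_le (by omega)]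

-- B's emit over the plan equals A's outer loop
theorem pvEmitB_eq_outer (keylist : List Int) (keys : List Int) (j : Nat) (hj : j ≤ keylist.length) :
    pvEmitB keylist (keys.zip (pvCutsB keylist keys j)) j = pvOuterA keylist keys j := by
  induction keys generalizing j with
  | nil =>
    simp only [pvCutsB, List.zip_nil_right, pvEmitB, pvOuterA]
    rw [PySem.List.slice_from_natCast, pvTailA_eq]
  | cons key ks ih =>
    simp only [pvCutsB, List.zip_cons_cons, pvEmitB, pvOuterA, pvInnerA_eq]
    set c := pvAdvB keylist key j with hc
    have h1 : j ≤ c := pvAdvB_ge keylist key j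
    have h2 : c ≤ keylist.length := pvAdvB_le keylist key j hj
    rw [PySem.List.slice_natCast, ih c h2]
    have hcond : (if c = j then (none : Option Int) else some (keylist.getD (c - 1) 0)) ≠ some key ↔
        (c = j ∨ keylist.getD (c - 1) 0 ≠ key) := by
      by_cases he : c = j <;> simp [he]
    by_cases hy : c = j ∨ keylist.getD (c - 1) 0 ≠ key
    · rw [if_pos hy, if_pos (hcond.mpr hy)]
    · rw [if_neg hy, if_neg (fun h => hy (hcond.mp h))]

-- ===== VERDICT =====
theorem dedup_merge_spec : Claim_equal_dedup_merge := by
  intro keyiter keylist _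
  unfold Spec_dedup_merge dedup_merge dedup_merge_alt
  exact (pvEmitB_eq_outer keylist keyiter 0 (by omega)).symm
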